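-- pv_equiv track=rewrite | github.com/Reol1017/odoo17 | baidu_ocr_expense/models/vat_invoice.py | _process_tax_rate
-- ===== SOURCE A (Python) =====
-- def _process_tax_rate(tax_rate_list):
--     """处理税率，如果所有税率相同则显示该税率，否则显示混合税率"""
--     if not tax_rate_list:
--         return ''
--
--     # 获取所有税率值
--     rates = [item.get('word', '') for item in tax_rate_list if item.get('word')]
--
--     if not rates:
--         return ''
--
--     # 检查是否所有税率相同
--     if len(set(rates)) == 1:
--         return rates[0]
--     else:
--         return '混合税率'
-- ===== SOURCE B (Python) =====
-- def _process_tax_rate(tax_rate_list):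
--     """Single pass with one running value and early exit instead of list + set."""
--     common = None
--     for item in tax_rate_list:
--         w = item.get('word')
--         if not w:
--             continue
--         if common is None:
--             common = w
--         elif w != common:
--             return '混合税率'
--     return '' if common is None else common
-- ===== Notes on version B (the rewrite author's own statement) =====
-- stated objective: simpler
-- what changed: Replaces the list comprehension plus set-cardinality test with a single pass that keeps one running common value and returns the mixed label early on the first mismatch.
import Mathlib
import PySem

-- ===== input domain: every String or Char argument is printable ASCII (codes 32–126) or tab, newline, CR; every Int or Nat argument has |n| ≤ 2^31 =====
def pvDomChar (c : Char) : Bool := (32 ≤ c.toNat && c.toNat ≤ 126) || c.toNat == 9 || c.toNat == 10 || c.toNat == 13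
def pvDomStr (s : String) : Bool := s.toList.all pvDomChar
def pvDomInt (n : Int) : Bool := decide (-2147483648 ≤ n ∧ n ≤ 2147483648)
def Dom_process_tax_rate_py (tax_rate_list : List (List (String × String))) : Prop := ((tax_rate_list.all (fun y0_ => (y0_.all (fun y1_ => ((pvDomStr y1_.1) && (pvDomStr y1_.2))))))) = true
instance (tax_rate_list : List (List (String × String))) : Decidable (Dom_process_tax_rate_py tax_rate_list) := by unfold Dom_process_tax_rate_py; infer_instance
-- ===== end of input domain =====

-- B replaces A's list comprehension + set-cardinality test with a single pass keeping one
-- running common value and an early exit on the first mismatch (objective: simpler).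

-- ===== PORT A =====
-- item.get('word', '') / truthiness of item.get('word') via PySem.Dict.get? on the association list
def process_tax_rate_py (tax_rate_list : List (List (String × String))) : String :=
  if tax_rate_list = [] then ""
  else
    let rates : List String :=
      (tax_rate_list.filter
          (fun item => ((PySem.Dict.mk item).get? "word").getD "" != "")).map
        (fun item => ((PySem.Dict.mk item).get? "word").getD "")
    if rates = [] then ""
    else if PySem.Set.len (PySem.Set.ofList rates) = 1 then rates.headD ""  -- rates[0]; rates ≠ [] here
    else "混合税率"

-- ===== PORT B =====
def pvAltLoop (common : Option String) : List (List (String × String)) → String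
  | [] => match common with | none => "" | some c => c
  | item :: rest =>
    let w := ((PySem.Dict.mk item).get? "word").getD ""   -- w falsy ⟺ missing or empty
    if w = "" then pvAltLoop common rest
    else
      match common with
      | none => pvAltLoop (some w) rest
      | some c => if w ≠ c then "混合税率" else pvAltLoop common rest

def process_tax_rate_py_alt (tax_rate_list : List (List (String × String))) : String :=
  pvAltLoop none tax_rate_list

-- ===== PRECONDITION & SPEC =====
def Spec_process_tax_rate_py (tax_rate_list : List (List (String × String))) (out : String) : Prop := out = process_tax_rate_py_alt tax_rate_list
instance (tax_rate_list : List (List (String × String))) (out : String) : Decidable (Spec_process_tax_rate_py tax_rate_list out) := by unfold Spec_process_tax_rate_py; infer_instance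

-- ===== CLAIM (what is proved, stated in full; the proofs are below) =====
def Claim_equal_process_tax_rate_py : Prop := ∀ (tax_rate_list : List (List (String × String))), Dom_process_tax_rate_py tax_rate_list → Spec_process_tax_rate_py tax_rate_list (process_tax_rate_py tax_rate_list)

-- ===== LEMMAS AND PROOFS =====

/-- B's loop viewed on the extracted word list only. -/
def pvWLoop (common : Option String) : List String → String
  | [] => match common with | none => "" | some c => c
  | w :: ws =>
    if w = "" then pvWLoop common ws
    else
      match common with
      | none => pvWLoop (some w) ws
      | some c => if w ≠ c then "混合税率" else pvWLoop common ws

def pvWord (item : List (String × String)) : String :=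
  ((PySem.Dict.mk item).get? "word").getD ""

theorem pvAltLoop_eq_wloop (c : Option String) (l : List (List (String × String))) :
    pvAltLoop c l = pvWLoop c (l.map pvWord) := by
  induction l generalizing c with
  | nil => rfl
  | cons item rest ih =>
    simp only [pvAltLoop, pvWLoop, List.map, pvWord]
    split_ifs with h
    · exact ih c
    · cases c with
      | none => exact ih _
      | some x => by_cases hx : pvWord item ≠ x <;> simp [pvWord] at hx ⊢ <;> simp [hx, ih]

theorem pvWLoop_filter (c : Option String) (ws : List String) :
    pvWLoop c ws = pvWLoop c (ws.filter (· != "")) := by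
  induction ws generalizing c with
  | nil => rfl
  | cons w ws ih =>
    by_cases h : w = ""
    · have hf : (w :: ws).filter (· != "") = ws.filter (· != "") := by simp [h]
      simp [pvWLoop, h, ih]
    · have hf : (w :: ws).filter (· != "") = w :: ws.filter (· != "") := by simp [h]
      rw [hf]
      cases c with
      | none => simp [pvWLoop, h, ih]
      | some x => by_cases hx : w = x <;> simp [pvWLoop, h, hx, ih]

theorem pvWLoop_some (x : String) (ws : List String) (hws : ∀ w ∈ ws, w ≠ "") :
    pvWLoop (some x) ws = if ∀ w ∈ ws, w = x then x else "混合税率" := by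
  induction ws with
  | nil => simp [pvWLoop]
  | cons w ws ih =>
    have hw : w ≠ "" := hws w (by simp)
    have ih' := ih (fun v hv => hws v (by simp [hv]))
    by_cases hx : w = x
    · simp [pvWLoop, hx, ih']
    · have hnall : ¬ ∀ v ∈ w :: ws, v = x := by
        intro h; exact hx (h w (by simp))
      simp [pvWLoop, hw, hx]

theorem pvLength_le_add (s : PySem.Set String) (x : String) :
    s.length ≤ (PySem.Set.add s x).length := by
  unfold PySem.Set.add; split_ifs <;> simp

theorem pvLength_le_foldl_add (l : List String) (s : PySem.Set String) :
    s.length ≤ (l.foldl PySem.Set.add s).length := by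
  induction l generalizing s with
  | nil => simp
  | cons w l ih => exact le_trans (pvLength_le_add s w) (ih _)

theorem pvSet_len_one (r : String) (rest : List String) :
    (PySem.Set.len (PySem.Set.ofList (r :: rest)) = 1) ↔ ∀ w ∈ rest, w = r := by
  have h : PySem.Set.ofList (r :: rest) = rest.foldl PySem.Set.add [r] := by
    simp [PySem.Set.ofList_eq_foldl, PySem.Set.add, PySem.Set.contains]
  rw [h]; clear h
  induction rest with
  | nil => simp [PySem.Set.len]
  | cons w rest ih =>
    by_cases hw : w = r
    · have ha : PySem.Set.add [r] w = [r] := by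
        simp [PySem.Set.add, PySem.Set.contains, hw]
      simp only [List.foldl_cons, ha]
      constructor
      · intro hlen v hv
        rcases List.mem_cons.mp hv with rfl | hv
        · exact hw
        · exact ih.mp hlen v hv
      · intro hall
        exact ih.mpr (fun v hv => hall v (List.mem_cons_of_mem _ hv))
    · have ha : PySem.Set.add [r] w = [r, w] := by
        simp [PySem.Set.add, PySem.Set.contains, hw]
      simp only [List.foldl_cons, ha]
      constructor
      · intro hlen
        have hle := pvLength_le_foldl_add rest [r, w]
        simp only [PySem.Set.len] at hlen
        simp only [List.length_cons, List.length_nil] at hle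
        omega
      · intro hall
        exact absurd (hall w (by simp)) hw

theorem pvWords_ne_empty (l : List (List (String × String)))
    (w : String)
    (hw : w ∈ (l.filter (fun item => pvWord item != "")).map pvWord) :
    w ≠ "" := by
  rcases List.mem_map.mp hw with ⟨item, hitem, rfl⟩
  have := List.of_mem_filter hitem
  simpa using this

-- ===== VERDICT (by name: the statement is the Claim_ definition above) =====
theorem process_tax_rate_py_spec : Claim_equal_process_tax_rate_py := by
  intro l _
  unfold Spec_process_tax_rate_py
  have hA : process_tax_rate_py l =
      (if l = [] then ""
       else if ((l.filter (fun item => pvWord item != "")).map pvWord) = [] then ""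
       else if PySem.Set.len
           (PySem.Set.ofList ((l.filter (fun item => pvWord item != "")).map pvWord)) = 1 then
         ((l.filter (fun item => pvWord item != "")).map pvWord).headD ""
       else "混合税率") := rfl
  have hfm : (l.map pvWord).filter (· != "") =
      (l.filter (fun item => pvWord item != "")).map pvWord := by
    rw [List.filter_map]; rfl
  have hB : process_tax_rate_py_alt l =
      pvWLoop none ((l.filter (fun item => pvWord item != "")).map pvWord) := by
    unfold process_tax_rate_py_alt
    rw [pvAltLoop_eq_wloop, pvWLoop_filter, hfm]
  obtain ⟨rates, hrates⟩ :
      ∃ rs, (l.filter (fun item => pvWord item != "")).map pvWord = rs := ⟨_, rfl⟩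
  have hne : ∀ w ∈ rates, w ≠ "" := fun w hw => pvWords_ne_empty l w (hrates ▸ hw)
  rw [hrates] at hA hB
  rw [hA, hB]
  by_cases hl : l = []
  · have : rates = [] := by subst hl; simpa using hrates.symm
    subst this
    simp [pvWLoop, hl]
  · rw [if_neg hl]
    cases rates with
    | nil => simp [pvWLoop]
    | cons r rest =>
      have hrne : r ≠ "" := hne r (by simp)
      have hrestne : ∀ w ∈ rest, w ≠ "" := fun w hw => hne w (by simp [hw])
      rw [if_neg (by simp : ¬ (r :: rest : List String) = [])]
      have hBn : pvWLoop none (r :: rest) = pvWLoop (some r) rest := by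
        simp [pvWLoop, hrne]
      rw [hBn, pvWLoop_some r rest hrestne]
      by_cases hall : ∀ w ∈ rest, w = r
      · rw [if_pos ((pvSet_len_one r rest).mpr hall), if_pos hall]
        rfl
      · rw [if_neg (fun hc => hall ((pvSet_len_one r rest).mp hc)), if_neg hall]
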